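-- pv_equiv track=rewrite | github.com/Thiago-SR/pontuacao-TOL | pontuacao_min_movs/main.py | movimentos_possiveis
-- ===== SOURCE A (Python) =====
-- import copy
--
-- def movimentos_possiveis(estado, altura_max):
--     estados = []
--     for i in range(len(estado)):
--         if not estado[i]:  # Pula pinos vazios
--             continue
--         bola = estado[i][-1]
--         for j in range(len(estado)):
--             if i != j and len(estado[j]) < altura_max:
--                 novo_estado = copy.deepcopy(estado)
--                 novo_estado[i].pop()
--                 novo_estado[j].append(bola)
--                 estados.append(novo_estado)
--     return estados
-- ===== SOURCE B (Python) =====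
-- def movimentos_possiveis(estado, altura_max):
--     # Zipper/structural recursion: no indices, no range, no deepcopy.
--     def insere(pinos, bola):
--         # All ways to drop bola onto one pin of pinos (with room), in order.
--         if not pinos:
--             return []
--         cabeca, cauda = pinos[0], pinos[1:]
--         resto = [[cabeca] + r for r in insere(cauda, bola)]
--         if len(cabeca) < altura_max:
--             return [[cabeca + [bola]] + cauda] + resto
--         return resto
--
--     def varre(antes, resto):
--         if not resto:
--             return []
--         pino, depois = resto[0], resto[1:]
--         movs = []
--         if pino:
--             bola, base = pino[-1], pino[:-1]
--             movs = [a + [base] + depois for a in insere(antes, bola)]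
--             movs += [antes + [base] + d for d in insere(depois, bola)]
--         return movs + varre(antes + [pino], depois)
--
--     return varre([], estado)
-- ===== Notes on version B (the rewrite author's own statement) =====
-- stated objective: alternative
-- what changed: B replaces A's index-based double loop (range over i and j with an in-loop room check and a per-move deepcopy) by a recursive zipper traversal of the pin list: for each nonempty pin it reinserts the top ball into the prefix and suffix by structural recursion (helper insere), using no indices, no range and no deepcopy.
import Mathlib
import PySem

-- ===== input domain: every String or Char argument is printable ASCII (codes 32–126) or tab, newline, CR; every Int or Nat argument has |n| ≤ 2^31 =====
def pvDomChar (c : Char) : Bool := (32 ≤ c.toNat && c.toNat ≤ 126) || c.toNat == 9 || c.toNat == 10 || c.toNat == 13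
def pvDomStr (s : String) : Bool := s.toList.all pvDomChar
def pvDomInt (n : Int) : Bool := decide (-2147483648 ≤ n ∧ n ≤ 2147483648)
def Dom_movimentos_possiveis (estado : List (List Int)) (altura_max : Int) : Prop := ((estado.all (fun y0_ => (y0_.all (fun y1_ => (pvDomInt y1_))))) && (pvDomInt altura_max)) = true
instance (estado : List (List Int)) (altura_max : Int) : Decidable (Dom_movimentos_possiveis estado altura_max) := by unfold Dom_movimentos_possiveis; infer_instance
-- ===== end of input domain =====

-- B replaces A's index-based double loop with a recursive zipper traversal: it walks the pin list
-- once, and for each nonempty pin reinserts its top ball into the prefix and the suffix by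
-- structural recursion (no indices, no range, no per-move deepcopy). Return values proved equal;
-- neither program mutates its argument (B's outputs share unmodified pin lists with the input,
-- A's are fresh copies — same values).

-- ===== PORT A =====
-- range(len(estado)) with a nonnegative in-range index: List.range + getD is exact here.
-- estado[i][-1] is only read when estado[i] ≠ [], so getLastD 0 is exact.
-- deepcopy + novo[i].pop() + novo[j].append(bola) = modify i dropLast, then modify j (· ++ [bola]).
def movimentos_possiveis (estado : List (List Int)) (altura_max : Int) : List (List (List Int)) :=
  (List.range estado.length).foldl (fun estados i =>
    let pino := estado.getD i []
    if pino = [] then estados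
    else
      let bola := pino.getLastD 0
      (List.range estado.length).foldl (fun estados j =>
        if i ≠ j ∧ ((estado.getD j []).length : Int) < altura_max then
          estados ++ [(estado.modify i List.dropLast).modify j (· ++ [bola])]
        else estados) estados) []

-- ===== PORT B =====
-- insere pinos bola: all ways to drop bola onto one pin of pinos (with room), in order.
def insereB (altura_max : Int) : List (List Int) → Int → List (List (List Int))
  | [], _ => []
  | cabeca :: cauda, bola =>
    let resto := (insereB altura_max cauda bola).map (fun r => cabeca :: r)
    if (cabeca.length : Int) < altura_max then ((cabeca ++ [bola]) :: cauda) :: resto else resto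

-- varre antes resto: zipper over the pin list; pino[-1] only read when pino ≠ [] (getLastD 0 exact).
def varreB (altura_max : Int) (antes : List (List Int)) : List (List Int) → List (List (List Int))
  | [] => []
  | pino :: depois =>
    (if pino ≠ [] then
       (insereB altura_max antes (pino.getLastD 0)).map (fun a => a ++ pino.dropLast :: depois) ++
       (insereB altura_max depois (pino.getLastD 0)).map (fun d => antes ++ pino.dropLast :: d)
     else []) ++ varreB altura_max (antes ++ [pino]) depois

def movimentos_possiveis_alt (estado : List (List Int)) (altura_max : Int) : List (List (List Int)) :=
  varreB altura_max [] estado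

-- ===== PRECONDITION & SPEC =====
def Spec_movimentos_possiveis (estado : List (List Int)) (altura_max : Int) (out : List (List (List Int))) : Prop := out = movimentos_possiveis_alt estado altura_max
instance (estado : List (List Int)) (altura_max : Int) (out : List (List (List Int))) : Decidable (Spec_movimentos_possiveis estado altura_max out) := by unfold Spec_movimentos_possiveis; infer_instance

-- ===== CLAIM (what is proved, stated in full; the proofs are below) =====
def Claim_equal_movimentos_possiveis : Prop := ∀ (estado : List (List Int)) (altura_max : Int), Dom_movimentos_possiveis estado altura_max → Spec_movimentos_possiveis estado altura_max (movimentos_possiveis estado altura_max)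

-- ===== LEMMAS AND PROOFS =====

-- One source's block of successor states, as A produces it (index form).
def stepA (estado : List (List Int)) (h : Int) (i : Nat) : List (List (List Int)) :=
  if estado.getD i [] = [] then []
  else ((List.range estado.length).filter
          (fun j => decide (i ≠ j ∧ ((estado.getD j []).length : Int) < h))).map
    (fun j => (estado.modify i List.dropLast).modify j (· ++ [(estado.getD i []).getLastD 0]))

-- The inner loop of A, flattened.
lemma inner_A_shape (estado : List (List Int)) (altura_max : Int) (l : List Nat) (i : Nat)
    (mk : Nat → Nat → List (List Int)) (acc : List (List (List Int))) :
    l.foldl (fun estados j =>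
        if i ≠ j ∧ ((estado.getD j []).length : Int) < altura_max then
          estados ++ [mk i j]
        else estados) acc =
      acc ++ (l.filter
          (fun j => decide (i ≠ j ∧ ((estado.getD j []).length : Int) < altura_max))).map (mk i) := by
  induction l generalizing acc with
  | nil => simp
  | cons j js ih =>
      rw [List.foldl_cons, ih, List.filter_cons]
      by_cases h1 : i = j
      · simp [h1]
      · by_cases h2 : ((estado.getD j []).length : Int) < altura_max
        all_goals rw [List.getD_eq_getElem?_getD] at h2
        · simp [h1, h2]
        · simp [h1, h2]

-- The outer loop of A, flattened into stepA blocks.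
lemma outer_A_shape (estado : List (List Int)) (altura_max : Int) (l : List Nat)
    (acc : List (List (List Int))) :
    l.foldl (fun estados i =>
        if estado.getD i [] = [] then estados
        else
          (List.range estado.length).foldl (fun estados j =>
            if i ≠ j ∧ ((estado.getD j []).length : Int) < altura_max then
              estados ++ [(estado.modify i List.dropLast).modify j
                            (· ++ [(estado.getD i []).getLastD 0])]
            else estados) estados) acc =
      acc ++ l.flatMap (stepA estado altura_max) := by
  induction l generalizing acc with
  | nil => simp
  | cons i is ih =>
      rw [List.foldl_cons, ih, List.flatMap_cons]
      by_cases h : estado.getD i [] = []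
      · rw [if_pos h]
        have hs : stepA estado altura_max i = [] := by unfold stepA; rw [if_pos h]
        rw [hs]; simp
      · rw [if_neg h,
          inner_A_shape estado altura_max (List.range estado.length) i
            (fun i j => (estado.modify i List.dropLast).modify j
              (· ++ [(estado.getD i []).getLastD 0]))]
        have hs : stepA estado altura_max i = ((List.range estado.length).filter
            (fun j => decide (i ≠ j ∧ ((estado.getD j []).length : Int) < altura_max))).map
            (fun j => (estado.modify i List.dropLast).modify j
              (· ++ [(estado.getD i []).getLastD 0])) := by
          unfold stepA; rw [if_neg h]
        rw [hs, List.append_assoc]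

-- modify distributes over append (left part).
lemma modify_append_left {α : Type} (as bs : List α) (j : Nat) (f : α → α) (hj : j < as.length) :
    (as ++ bs).modify j f = as.modify j f ++ bs := by
  induction as generalizing j with
  | nil => simp at hj
  | cons a as ih =>
      cases j with
      | zero => simp [List.modify]
      | succ j =>
          simp only [List.cons_append, List.modify_succ_cons]
          rw [ih j (by simpa using hj)]

-- modify distributes over append (right part).
lemma modify_append_right {α : Type} (as bs : List α) (j : Nat) (f : α → α) :
    (as ++ bs).modify (as.length + j) f = as ++ bs.modify j f := by
  induction as with
  | nil => simp
  | cons a as ih =>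
      simp only [List.cons_append, List.length_cons]
      rw [Nat.succ_add, List.modify_succ_cons, ih]

-- Characterisation of insereB by indices.
lemma insereB_spec (h : Int) (pinos : List (List Int)) (bola : Int) :
    insereB h pinos bola =
      ((List.range pinos.length).filter
          (fun j => decide (((pinos.getD j []).length : Int) < h))).map
        (fun j => pinos.modify j (· ++ [bola])) := by
  induction pinos with
  | nil => simp [insereB]
  | cons cabeca cauda ih =>
      rw [insereB, List.length_cons, List.range_succ_eq_map, List.filter_cons]
      have hcomm : ((List.range cauda.length).map Nat.succ).filter
          (fun j => decide ((((cabeca :: cauda).getD j []).length : Int) < h)) =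
          ((List.range cauda.length).filter
            (fun j => decide (((cauda.getD j []).length : Int) < h))).map Nat.succ := by
        rw [List.filter_map]
        congr 1
      have hmap : ∀ (l : List Nat), (l.map Nat.succ).map
          (fun j => (cabeca :: cauda).modify j (· ++ [bola])) =
          (l.map (fun j => cauda.modify j (· ++ [bola]))).map (fun r => cabeca :: r) := by
        intro l
        rw [List.map_map, List.map_map]
        apply List.map_congr_left
        intro j _
        simp [List.modify_succ_cons]
      by_cases hc : ((cabeca.length : Int) < h)
      · rw [if_pos hc, if_pos (by simp [hc]), List.map_cons, hcomm, hmap, ih]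
        simp [List.modify]
      · rw [if_neg hc, if_neg (by simp [hc]), hcomm, hmap, ih]

-- The block stepA produces at the source position splits into the prefix and suffix insertions.
lemma stepA_split (antes depois : List (List Int)) (pino : List Int) (h : Int)
    (hp : pino ≠ []) :
    stepA (antes ++ pino :: depois) h antes.length =
      (insereB h antes (pino.getLastD 0)).map (fun a => a ++ pino.dropLast :: depois) ++
      (insereB h depois (pino.getLastD 0)).map (fun d => antes ++ pino.dropLast :: d) := by
  have hget : (antes ++ pino :: depois).getD antes.length [] = pino := by
    rw [List.getD_eq_getElem?_getD, List.getElem?_append_right (le_refl _)]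
    simp
  have hgetL : ∀ j, j < antes.length →
      (antes ++ pino :: depois)[j]?.getD ([] : List Int) = antes[j]?.getD [] := by
    intro j hj
    rw [List.getElem?_append_left hj]
  have hgetR : ∀ t : Nat, (antes ++ pino :: depois)[antes.length + (t + 1)]?.getD ([] : List Int) =
      depois[t]?.getD [] := by
    intro t
    rw [List.getElem?_append_right (Nat.le_add_right _ _), Nat.add_sub_cancel_left]
    simp
  have hmod : (antes ++ pino :: depois).modify antes.length List.dropLast =
      antes ++ pino.dropLast :: depois := by
    have := modify_append_right antes (pino :: depois) 0 List.dropLast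
    simpa using this
  unfold stepA
  rw [if_neg (by rw [hget]; exact hp), hget, hmod]
  have hlen : (antes ++ pino :: depois).length = antes.length + (1 + depois.length) := by
    simp; omega
  rw [hlen, List.range_add, List.filter_append, List.map_append]
  congr 1
  · -- prefix part: j < antes.length
    rw [insereB_spec, List.map_map]
    rw [List.filter_congr (l := List.range antes.length)
        (q := fun j => decide (((antes.getD j []).length : Int) < h))
        (by intro j hj
            have hjlt := List.mem_range.mp hj
            simp [List.getD_eq_getElem?_getD, hgetL j hjlt, Nat.ne_of_gt hjlt])]
    apply List.map_congr_left
    intro j hj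
    have hjlt := List.mem_range.mp (List.mem_filter.mp hj).1
    simp only [Function.comp]
    rw [modify_append_left _ _ _ _ hjlt]
  · -- suffix part: j = antes.length + (t + 1)
    rw [List.filter_map, List.map_map]
    have h1 : (1 + depois.length) = depois.length + 1 := by omega
    rw [h1, List.range_succ_eq_map, List.filter_cons]
    rw [if_neg (by simp)]
    rw [List.filter_map, List.map_map, insereB_spec, List.map_map]
    rw [List.filter_congr (l := List.range depois.length)
        (q := fun t => decide (((depois.getD t []).length : Int) < h))
        (by intro t _
            have hne : antes.length ≠ antes.length + Nat.succ t := by omega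
            simp only [Function.comp, List.getD_eq_getElem?_getD]
            have := hgetR t
            simp only [Nat.succ_eq_add_one] at *
            simp [this])]
    apply List.map_congr_left
    intro t _
    simp only [Function.comp, Nat.succ_eq_add_one]
    have hmr := modify_append_right antes (pino.dropLast :: depois) (t + 1)
      (· ++ [pino.getLastD 0])
    rw [hmr]
    simp [List.modify_succ_cons]

-- The zipper recursion produces exactly the stepA blocks of the suffix, in order.
lemma varreB_spec (h : Int) (resto antes : List (List Int)) :
    varreB h antes resto =
      ((List.range resto.length).map (antes.length + ·)).flatMap
        (stepA (antes ++ resto) h) := by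
  induction resto generalizing antes with
  | nil => simp [varreB]
  | cons pino depois ih =>
      rw [varreB, List.length_cons, List.range_succ_eq_map, List.map_cons, List.flatMap_cons,
        List.map_map, ih (antes ++ [pino])]
      have hassoc : (antes ++ [pino]) ++ depois = antes ++ pino :: depois := by simp
      rw [hassoc]
      congr 1
      · simp only [Nat.add_zero]
        by_cases hp : pino = []
        · simp [stepA, hp, List.getD_eq_getElem?_getD]
        · rw [if_pos hp, stepA_split antes depois pino h hp]
      · congr 1
        apply List.map_congr_left
        intro a _
        simp [Function.comp]
        omega

-- ===== VERDICT (by name: the statement is the Claim_ definition above) =====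
theorem movimentos_possiveis_spec : Claim_equal_movimentos_possiveis := by
  intro estado altura_max _
  unfold Spec_movimentos_possiveis
  show movimentos_possiveis estado altura_max = movimentos_possiveis_alt estado altura_max
  unfold movimentos_possiveis movimentos_possiveis_alt
  simp only []
  rw [varreB_spec]
  simp only [List.nil_append, List.length_nil, Nat.zero_add]
  rw [List.map_id']
  rw [outer_A_shape estado altura_max (List.range estado.length) [], List.nil_append]
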